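-- pv_equiv track=rewrite | github.com/shakaibsaleem/Compiler | Python/main.py | removeTabs
-- ===== SOURCE A (Python) =====
-- def removeTabs(stream):
-- 	new = ""
-- 	isString = False
-- 	for i in range(len(stream)):
-- 		char = stream[i]
--
-- 		if char == '"' :
-- 			if not isString:
-- 				isString = True
-- 			else:
-- 				isString = False
--
-- 		# ignore tab characters, keep rest
-- 		if char != '\t':
-- 			new = new + char
-- 		elif isString:
-- 			new = new + char
-- 	return new
-- ===== SOURCE B (Python) =====
-- def removeTabs(stream):
--     parts = stream.split('"')
--     return '"'.join(seg.replace('\t', '') if i % 2 == 0 else seg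
--                     for i, seg in enumerate(parts))
-- ===== Notes on version B (the rewrite author's own statement) =====
-- stated objective: alternative
-- what changed: Replaces the char-by-char loop with a quote-counting boolean flag by a split on '"': even-indexed segments (outside string literals) get their tabs removed wholesale, odd ones are kept, then the pieces are rejoined.
import Mathlib
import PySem

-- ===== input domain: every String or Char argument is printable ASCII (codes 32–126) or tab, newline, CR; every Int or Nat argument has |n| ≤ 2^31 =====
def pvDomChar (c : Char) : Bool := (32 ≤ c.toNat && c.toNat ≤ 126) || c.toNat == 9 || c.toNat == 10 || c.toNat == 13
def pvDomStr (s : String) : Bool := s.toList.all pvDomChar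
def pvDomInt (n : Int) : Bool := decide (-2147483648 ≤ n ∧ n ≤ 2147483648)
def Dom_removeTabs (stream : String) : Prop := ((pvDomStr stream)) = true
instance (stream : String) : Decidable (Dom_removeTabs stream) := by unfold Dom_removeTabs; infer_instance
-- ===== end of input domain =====

-- B removes tabs by splitting at quotes and stripping the even (outside-literal) segments — an alternative decomposition, not claimed faster.

-- ===== PORT A =====
-- A's loop body: toggle isString on '"', append non-tab chars, append tabs only when isString.
def pvStepA (st : List Char × Bool) (char : Char) : List Char × Bool :=
  let isString := if char = '"' then (if !st.2 then true else false) else st.2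
  if char ≠ '\t' then (st.1 ++ [char], isString)
  else if isString then (st.1 ++ [char], isString)
  else (st.1, isString)

def removeTabs (stream : String) : String :=
  String.mk (stream.toList.foldl pvStepA ([], false)).1

-- ===== PORT B =====
-- Source B's generator over enumerate(parts): even index (outside = true) → strip tabs, odd → keep.
def pvProcParts : Bool → List (List Char) → List (List Char)
  | _, [] => []
  | outside, s :: ss =>
    (if outside then s.filter (fun c => c ≠ '\t') else s) :: pvProcParts (!outside) ss

def removeTabs_alt (stream : String) : String :=
  String.mk (List.intercalate ['"'] (pvProcParts true (stream.toList.splitOn '"')))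

-- ===== PRECONDITION & SPEC =====
def Spec_removeTabs (stream : String) (out : String) : Prop := out = removeTabs_alt stream
instance (stream : String) (out : String) : Decidable (Spec_removeTabs stream out) := by unfold Spec_removeTabs; infer_instance

-- ===== CLAIM (what is proved, stated in full; the proofs are below) =====
def Claim_equal_removeTabs : Prop := ∀ (stream : String), Dom_removeTabs stream → Spec_removeTabs stream (removeTabs stream)

-- ===== LEMMAS AND PROOFS =====

-- Non-accumulator form of A's loop.
def loopA : List Char → Bool → List Char
  | [], _ => []
  | c :: cs, b =>
    let b' := if c = '"' then !b else b
    (if c ≠ '\t' then [c] else if b' then [c] else []) ++ loopA cs b'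

theorem stepA_eq (acc : List Char) (b : Bool) (c : Char) :
    pvStepA (acc, b) c =
      (acc ++ (if c ≠ '\t' then [c] else if (if c = '"' then !b else b) then [c] else []),
       if c = '"' then !b else b) := by
  by_cases hq : c = '"'
  · subst hq
    cases b <;> simp [pvStepA]
  · by_cases ht : c = '\t'
    · subst ht
      cases b <;> simp [pvStepA, hq]
    · simp [pvStepA, hq, ht]

theorem foldA_eq (cs : List Char) (acc : List Char) (b : Bool) :
    (cs.foldl pvStepA (acc, b)).1 = acc ++ loopA cs b := by
  induction cs generalizing acc b with
  | nil => simp [loopA]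
  | cons c cs ih =>
    rw [List.foldl_cons, stepA_eq, ih]
    simp [loopA]

theorem intercalate_cons_ne_nil (s x : List Char) (t : List (List Char)) (h : t ≠ []) :
    List.intercalate s (x :: t) = x ++ s ++ List.intercalate s t := by
  cases t with
  | nil => exact absurd rfl h
  | cons y t => simp [List.intercalate, List.intersperse]

theorem intercalate_prepend_head (s pre x : List Char) (t : List (List Char)) :
    List.intercalate s ((pre ++ x) :: t) = pre ++ List.intercalate s (x :: t) := by
  cases t with
  | nil => simp [List.intercalate]
  | cons y t => simp [List.intercalate, List.intersperse]

theorem splitOn_exists_cons (cs : List Char) :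
    ∃ h t, cs.splitOn '"' = h :: t := by
  have := List.splitOnP_ne_nil (fun x => x == '"') cs
  cases hc : cs.splitOn '"' with
  | nil => exact absurd hc this
  | cons a t => exact ⟨a, t, rfl⟩

theorem loopA_eq (cs : List Char) (b : Bool) :
    loopA cs b = List.intercalate ['"'] (pvProcParts (!b) (cs.splitOn '"')) := by
  induction cs generalizing b with
  | nil =>
    simp [loopA, List.splitOn, List.splitOnP_nil, pvProcParts, List.intercalate]
  | cons c cs ih =>
    by_cases hq : c = '"'
    · subst hq
      have hs : ((('"' : Char) :: cs).splitOn '"') = [] :: cs.splitOn '"' := by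
        simp [List.splitOn, List.splitOnP_cons]
      have h1 : loopA ('"' :: cs) b = '"' :: loopA cs (!b) := by simp [loopA]
      have hne : pvProcParts b (cs.splitOn '"') ≠ [] := by
        obtain ⟨h, t, hht⟩ := splitOn_exists_cons cs
        rw [hht]; simp [pvProcParts]
      rw [hs, h1, ih (!b)]
      simp only [pvProcParts, Bool.not_not]
      have hhead : (if (!b) = true then List.filter (fun c => decide (c ≠ '\t')) [] else []) = ([] : List Char) := by
        cases b <;> rfl
      rw [hhead, intercalate_cons_ne_nil _ _ _ hne]
      simp
    · obtain ⟨h, t, hht⟩ := splitOn_exists_cons cs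
      have hs : ((c :: cs).splitOn '"') = (c :: h) :: t := by
        simp [List.splitOn, List.splitOnP_cons, hq]
        rw [show cs.splitOnP (fun x => x == '"') = h :: t from hht]
        rfl
      have h1 : loopA (c :: cs) b = (if c ≠ '\t' then [c] else if b then [c] else []) ++ loopA cs b := by
        simp [loopA, hq]
      rw [hs, h1, ih b, hht]
      simp only [pvProcParts, Bool.not_not]
      cases b with
      | false =>
        by_cases ht2 : c = '\t'
        · subst ht2
          simp
        · have hf : (c :: h).filter (fun c => c ≠ '\t') = c :: h.filter (fun c => c ≠ '\t') := by
            simp [ht2]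
          simp only [Bool.not_false, hf, if_pos (by simpa using ht2)]
          exact (intercalate_prepend_head ['"'] [c] (h.filter (fun c => c ≠ '\t'))
            (pvProcParts false t)).symm
      | true =>
        simp only [Bool.not_true, if_neg (by simp : ¬ (false = true))]
        by_cases ht2 : c = '\t' <;>
          simpa [ht2] using
            (intercalate_prepend_head ['"'] [c] h (pvProcParts true t)).symm

-- ===== VERDICT (by name: the statement is the Claim_ definition above) =====
theorem removeTabs_spec : Claim_equal_removeTabs := by
  intro stream _
  unfold Spec_removeTabs removeTabs removeTabs_alt
  rw [foldA_eq, List.nil_append, loopA_eq]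
  simp
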